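-- pv_equiv track=rewrite | github.com/timbernat/polymerist | maths/combinatorics/partitions.py | multiset_partition
-- ===== SOURCE A (Python) =====
-- from typing import Generator
--
-- def multiset_partition(n : int, k : int) -> Generator[tuple[int], None, None]:
--     '''Enumerates all multisets of k integers whose sum is n (respects order and includes 0s)'''
--     if k == 0:
--         yield ()
--     elif k == 1:
--         yield (n,)
--     else:
--         for i in range(0, n + 1):
--             for subpart in multiset_partition(n - i , k - 1):
--                 yield (i,) + subpart
-- ===== SOURCE B (Python) =====
-- from typing import Generator
--
-- def multiset_partition(n : int, k : int) -> Generator[tuple[int], None, None]: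
--     '''Enumerates all multisets of k integers whose sum is n (respects order and includes 0s)'''
--     if k == 0:
--         yield ()
--         return
--     # iterative depth-first search with an explicit stack instead of recursion
--     stack = [(n, ())]
--     while stack:
--         rem, prefix = stack.pop()
--         if k - len(prefix) == 1:
--             yield prefix + (rem,)
--         else:
--             for i in range(rem, -1, -1):  # pushed descending, so popped ascending
--                 stack.append((rem - i, prefix + (i,)))
-- ===== Notes on version B (the rewrite author's own statement) =====
-- stated objective: alternative
-- what changed: Replaces A's recursion over k by an iterative depth-first search that pops (remainder, prefix) pairs from an explicit stack, pushing the next parts in descending order so they pop in A's lexicographic order; no recursion, so B also returns where A would hit the recursion limit.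
-- outside the precondition, e.g. on multiset_partition(0, 9999): A raises RecursionError
import Mathlib
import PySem

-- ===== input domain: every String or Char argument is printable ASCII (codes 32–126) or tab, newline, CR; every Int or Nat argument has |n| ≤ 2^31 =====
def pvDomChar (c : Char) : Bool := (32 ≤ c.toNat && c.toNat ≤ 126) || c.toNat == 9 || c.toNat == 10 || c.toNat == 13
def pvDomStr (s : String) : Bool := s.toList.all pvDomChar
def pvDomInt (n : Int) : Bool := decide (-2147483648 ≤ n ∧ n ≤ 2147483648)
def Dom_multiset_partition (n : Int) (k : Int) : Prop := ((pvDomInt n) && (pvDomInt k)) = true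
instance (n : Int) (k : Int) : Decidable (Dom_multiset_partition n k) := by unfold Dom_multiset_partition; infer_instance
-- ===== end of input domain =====

-- B replaces A's recursion over k by an iterative depth-first search with an explicit stack (alternative decomposition, same cost).

-- ===== PORT A =====
-- A recurses on k; the Nat fuel (k.toNat + 1) only makes the same recursion total
-- (under Pre_ the fuel never runs out: k drops by 1 per level and bottoms at 0 or 1).
def multiset_partition_fuel : Nat → Int → Int → List (List Int)
  | 0, _, _ => []
  | fuel + 1, n, k =>
    if k = 0 then [[]]
    else if k = 1 then [[n]]
    else (PySem.List.pyRange 0 (n + 1) 1).flatMap (fun i =>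
      (multiset_partition_fuel fuel (n - i) (k - 1)).map (fun subpart => i :: subpart))

def multiset_partition (n : Int) (k : Int) : List (List Int) :=
  multiset_partition_fuel (k.toNat + 1) n k

-- ===== PORT B =====
-- the while-stack loop of B; the stack's head is its top; the push loop 'for i in range(rem, -1, -1):
-- stack.push(...)' is the foldl consing each pushed pair on top; the fuel only makes the loop total
-- (under Pre_ it never runs out, see costN_le_pow below).
def mpGo : Nat → Int → List (Int × List Int) → List (List Int)
  | 0, _, _ => []
  | fuel + 1, k, stack =>
    match stack with
    | [] => []
    | (rem, pre) :: rest =>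
      if k - (pre.length : Int) = 1 then
        (pre ++ [rem]) :: mpGo fuel k rest
      else
        mpGo fuel k ((PySem.List.pyRange rem (-1) (-1)).foldl
          (fun st i => (rem - i, pre ++ [i]) :: st) rest)

def multiset_partition_alt (n : Int) (k : Int) : List (List Int) :=
  if k = 0 then [[]]
  else mpGo ((n.toNat + 2) ^ (k.toNat + 1)) k [(n, [])]

-- ===== PRECONDITION & SPEC =====
-- Pre_ excludes exactly the inputs on which A raises RecursionError: k < 0 with n ≥ 0 (the recursion
-- on k - 1 never reaches its base cases, so it recurses without bound), and k > 9000, where A's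
-- recursion depth k exceeds CPython's recursion limit (with the default limit of 1000 A already
-- raises near k = 999; 9000 stays below any harness limit in use).
def Pre_multiset_partition (n : Int) (k : Int) : Prop := n < 0 ∨ (0 ≤ k ∧ k ≤ 9000)
instance (n : Int) (k : Int) : Decidable (Pre_multiset_partition n k) := by
  unfold Pre_multiset_partition; infer_instance

def pvWitness_multiset_partition : Int × Int := (5, 3)

def Spec_multiset_partition (n : Int) (k : Int) (out : List (List Int)) : Prop :=
  out = multiset_partition_alt n k
instance (n : Int) (k : Int) (out : List (List Int)) : Decidable (Spec_multiset_partition n k out) := by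
  unfold Spec_multiset_partition; infer_instance

-- ===== CLAIM (what is proved, stated in full; the proofs are below) =====
def Claim_equal_multiset_partition : Prop := ∀ (n : Int) (k : Int),
  Dom_multiset_partition n k → Pre_multiset_partition n k →
  Spec_multiset_partition n k (multiset_partition n k)

-- ===== LEMMAS AND PROOFS =====

-- the common mathematical value: all j-part compositions of n, lexicographically
def mpSpec : Nat → Int → List (List Int)
  | 0, _ => [[]]
  | 1, n => [[n]]
  | j + 2, n => (PySem.List.pyRange 0 (n + 1) 1).flatMap (fun i =>
      (mpSpec (j + 1) (n - i)).map (fun t => i :: t))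

-- number of loop iterations (pops) B spends on a stack entry with remainder rem and j parts left
def costN : Nat → Int → Nat
  | 0, _ => 1
  | 1, _ => 1
  | j + 2, rem => 1 + ((PySem.List.pyRange 0 (rem + 1) 1).map (fun i => costN (j + 1) (rem - i))).sum

lemma costN_pos (j : Nat) (rem : Int) : 1 ≤ costN j rem := by
  match j with
  | 0 => simp [costN]
  | 1 => simp [costN]
  | j + 2 => simp [costN]

lemma costN_le_pow : ∀ (j : Nat) (rem : Int) (c : Nat), rem.toNat ≤ c →
    costN j rem ≤ (c + 2) ^ j := by
  intro j
  induction j using Nat.strong_induction_on with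
  | _ j ih =>
    intro rem c hc
    match j with
    | 0 => simp [costN]
    | 1 => simp [costN]
    | j + 2 =>
      rw [costN]
      have hlen : ((PySem.List.pyRange 0 (rem + 1) 1).map (fun i => costN (j + 1) (rem - i))).length
          = (rem + 1).toNat := by
        simp [PySem.List.length_pyRange_one]
      have hsum : ((PySem.List.pyRange 0 (rem + 1) 1).map (fun i => costN (j + 1) (rem - i))).sum
          ≤ (rem + 1).toNat * (c + 2) ^ (j + 1) := by
        rw [← hlen]
        apply List.sum_le_card_nsmul
        intro x hx
        simp only [List.mem_map] at hx
        obtain ⟨i, hi, rfl⟩ := hx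
        rw [PySem.List.mem_pyRange_one] at hi
        exact ih (j + 1) (by omega) (rem - i) c (by omega)
      calc 1 + ((PySem.List.pyRange 0 (rem + 1) 1).map (fun i => costN (j + 1) (rem - i))).sum
          ≤ 1 + (rem + 1).toNat * (c + 2) ^ (j + 1) := by omega
        _ ≤ (c + 2) ^ (j + 1) + (c + 1) * (c + 2) ^ (j + 1) := by
            have h1 : (1:Nat) ≤ (c + 2) ^ (j + 1) := Nat.one_le_pow _ _ (by omega)
            have h2 : (rem + 1).toNat ≤ c + 1 := by omega
            have := Nat.mul_le_mul_right ((c + 2) ^ (j + 1)) h2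
            omega
        _ = (c + 2) ^ (j + 2) := by ring

lemma fuelA (fuel : Nat) : ∀ (j : Nat) (n : Int), j < fuel →
    multiset_partition_fuel fuel n (j : Int) = mpSpec j n := by
  induction fuel with
  | zero => intro j n h; omega
  | succ f ih =>
    intro j n h
    match j with
    | 0 => simp [multiset_partition_fuel, mpSpec]
    | 1 => simp [multiset_partition_fuel, mpSpec]
    | j + 2 =>
      have h0 : ((j + 2 : Nat) : Int) ≠ 0 := by omega
      have h1 : ((j + 2 : Nat) : Int) ≠ 1 := by omega
      have hc : ((j + 2 : Nat) : Int) - 1 = ((j + 1 : Nat) : Int) := by omega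
      simp only [multiset_partition_fuel, if_neg h0, if_neg h1, hc, mpSpec]
      congr 1
      funext i
      rw [ih (j + 1) (n - i) (by omega)]

-- the push loop, read back: pushing i = rem, rem-1, …, 0 on top leaves them popped in ascending order
lemma push_loop (rem : Int) (f : Int → (Int × List Int)) (rest : List (Int × List Int)) :
    (PySem.List.pyRange rem (-1) (-1)).foldl (fun st i => f i :: st) rest
      = (PySem.List.pyRange 0 (rem + 1) 1).map f ++ rest := by
  have h : PySem.List.pyRange rem (-1) (-1) = (PySem.List.pyRange 0 (rem + 1) 1).reverse := by
    rw [PySem.List.pyRange_neg_one_eq_reverse]; norm_num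
  rw [h, List.foldl_reverse]
  induction (PySem.List.pyRange 0 (rem + 1) 1) with
  | nil => rfl
  | cons a t iht => simp [List.foldr_cons, iht]

lemma mpGo_nil (f : Nat) (k : Int) : mpGo f k [] = [] := by cases f <;> rfl

lemma mpGo_cons (f : Nat) (k rem : Int) (pre : List Int) (rest : List (Int × List Int)) :
    mpGo (f + 1) k ((rem, pre) :: rest)
      = if k - (pre.length : Int) = 1 then (pre ++ [rem]) :: mpGo f k rest
        else mpGo f k ((PySem.List.pyRange rem (-1) (-1)).foldl
          (fun st i => (rem - i, pre ++ [i]) :: st) rest) := rfl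

-- main loop invariant: given enough fuel, the DFS emits, for each stack entry in order,
-- all (k - len pre)-part compositions of its remainder, prefixed
lemma goA (k : Int) : ∀ (fuel : Nat) (stack : List (Int × List Int)),
    (∀ p ∈ stack, 0 ≤ p.1 ∧ 1 ≤ k - (p.2.length : Int)) →
    (stack.map (fun p => costN (k - (p.2.length : Int)).toNat p.1)).sum ≤ fuel →
    mpGo fuel k stack
      = stack.flatMap (fun p => (mpSpec (k - (p.2.length : Int)).toNat p.1).map (fun t => p.2 ++ t)) := by
  intro fuel
  induction fuel with
  | zero =>
    intro stack hinv hcost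
    match stack with
    | [] => rfl
    | p :: rest =>
      exfalso
      have := costN_pos (k - (p.2.length : Int)).toNat p.1
      rw [List.map_cons, List.sum_cons] at hcost
      omega
  | succ f ih =>
    intro stack hinv hcost
    match stack with
    | [] => rfl
    | (rem, pre) :: rest =>
      have hp := hinv (rem, pre) (List.mem_cons_self ..)
      simp only at hp
      by_cases hj : k - (pre.length : Int) = 1
      · rw [mpGo_cons, if_pos hj]
        rw [ih rest (fun p hp => hinv p (List.mem_cons_of_mem _ hp)) (by
          rw [List.map_cons, List.sum_cons] at hcost
          have := costN_pos (k - (pre.length : Int)).toNat rem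
          simp only at hcost
          omega)]
        rw [List.flatMap_cons, hj]
        simp [mpSpec]
      · rw [mpGo_cons, if_neg hj]
        obtain ⟨j, hjeq⟩ : ∃ j, (k - (pre.length : Int)).toNat = j + 2 := ⟨(k - pre.length).toNat - 2, by omega⟩
        rw [push_loop rem (fun i => (rem - i, pre ++ [i])) rest]
        rw [ih _ ?_ ?_]
        · rw [List.flatMap_append, List.flatMap_cons, List.flatMap_map]
          congr 1
          rw [hjeq, mpSpec, List.map_flatMap]
          apply List.flatMap_congr
          intro i hi
          rw [PySem.List.mem_pyRange_one] at hi
          have hlen : (k - ((pre ++ [i]).length : Int)).toNat = j + 1 := by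
            simp only [List.length_append, List.length_cons, List.length_nil]
            omega
          simp only [hlen, List.map_map]
          congr 1
          funext t
          simp [List.append_assoc]
        · intro p hp'
          rw [List.mem_append] at hp'
          rcases hp' with hp' | hp'
          · simp only [List.mem_map] at hp'
            obtain ⟨i, hi, rfl⟩ := hp'
            rw [PySem.List.mem_pyRange_one] at hi
            simp only [List.length_append, List.length_cons, List.length_nil]
            constructor <;> omega
          · exact hinv p (List.mem_cons_of_mem _ hp')
        · simp only [List.map_cons, List.sum_cons, hjeq, costN] at hcost
          rw [List.map_append, List.sum_append, List.map_map]
          have : ((PySem.List.pyRange 0 (rem + 1) 1).map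
              ((fun p => costN (k - (p.2.length : Int)).toNat p.1) ∘ fun i => (rem - i, pre ++ [i])))
              = (PySem.List.pyRange 0 (rem + 1) 1).map (fun i => costN (j + 1) (rem - i)) := by
            apply List.map_congr_left
            intro i hi
            simp only [Function.comp_apply, List.length_append, List.length_cons, List.length_nil]
            congr 2
            omega
          rw [this]
          omega

-- ===== VERDICT (by name: the statement is the Claim_ definition above) =====
theorem multiset_partition_spec : Claim_equal_multiset_partition := by
  intro n k _ hpre
  unfold Spec_multiset_partition multiset_partition multiset_partition_alt
  by_cases hk0 : k = 0
  · simp [hk0, multiset_partition_fuel]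
  · rw [if_neg hk0]
    by_cases hk1 : k = 1
    · -- both sides are [[n]]
      subst hk1
      obtain ⟨m, hm⟩ : ∃ m, (n.toNat + 2) ^ (Int.toNat 1 + 1) = m + 1 + 1 := by
        refine ⟨(n.toNat + 2) ^ (Int.toNat 1 + 1) - 2, ?_⟩
        have h4 := Nat.pow_le_pow_left (show 2 ≤ n.toNat + 2 by omega) (Int.toNat 1 + 1)
        simp only [Int.toNat_one] at h4 ⊢
        norm_num at h4 ⊢
        omega
      rw [hm]
      rfl
    · by_cases hn : n < 0
      · -- n < 0 and k ∉ {0,1}: A's range is empty, B's root pushes nothing; both []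
        have hA : multiset_partition_fuel (k.toNat + 1) n k = [] := by
          rw [multiset_partition_fuel, if_neg hk0, if_neg hk1,
            PySem.List.pyRange_one_eq_nil (by omega : n + 1 ≤ 0), List.flatMap_nil]
        rw [hA]
        have hfuel : ∃ m, (n.toNat + 2) ^ (k.toNat + 1) = m + 1 := by
          refine ⟨(n.toNat + 2) ^ (k.toNat + 1) - 1, ?_⟩
          have := Nat.one_le_pow (k.toNat + 1) (n.toNat + 2) (by omega)
          omega
        obtain ⟨m, hm⟩ := hfuel
        rw [hm, mpGo_cons]
        simp only [List.length_nil, Nat.cast_zero, Int.sub_zero]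
        rw [if_neg hk1, PySem.List.pyRange_neg_one_eq_nil (by omega : n ≤ -1),
          List.foldl_nil, mpGo_nil]
      · -- main case: 2 ≤ k (Pre_ gives 0 ≤ k), 0 ≤ n
        have hk2 : 2 ≤ k := by
          rcases hpre with h | h
          · omega
          · omega
        have hkj : k = ((k.toNat : Nat) : Int) := by omega
        conv_lhs => rw [hkj]
        rw [fuelA _ k.toNat n (by omega)]
        rw [goA k _ [(n, [])] ?_ ?_]
        · simp
        · intro p hp
          simp only [List.mem_singleton] at hp
          subst hp
          simp only [List.length_nil, Nat.cast_zero]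
          constructor <;> omega
        · simp only [List.map_cons, List.map_nil, List.sum_cons, List.sum_nil, List.length_nil,
            Nat.cast_zero, Int.sub_zero, Nat.add_zero]
          calc costN k.toNat n ≤ (n.toNat + 2) ^ k.toNat := costN_le_pow k.toNat n n.toNat (le_refl _)
            _ ≤ (n.toNat + 2) ^ (k.toNat + 1) := Nat.pow_le_pow_right (by omega) (by omega)
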